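-- pv_equiv track=rewrite | github.com/MrBrantCode/unitest_baseline | mut_generate/mist_train_taco/taco_11316/solution.py | calculate_skier_time
-- ===== SOURCE A (Python) =====
-- def calculate_skier_time(movements: str) -> int:
--     visited_segments = set()
--     time_taken = 0
--     x, y = 0, 0
--
--     for move in movements:
--         start_pos = (x, y)
--         if move == 'N':
--             y += 1
--         elif move == 'S':
--             y -= 1
--         elif move == 'E':
--             x += 1
--         elif move == 'W':
--             x -= 1
--
--         end_pos = (x, y)
--         segment = (start_pos, end_pos)
--         reverse_segment = (end_pos, start_pos)
--
--         if segment in visited_segments or reverse_segment in visited_segments: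
--             time_taken += 1
--         else:
--             time_taken += 5
--             visited_segments.add(segment)
--             visited_segments.add(reverse_segment)
--
--     return time_taken
-- ===== SOURCE B (Python) =====
-- def calculate_skier_time(movements: str) -> int:
--     # Staged passes: build the full position trail, canonicalize each step's
--     # undirected segment, sort the segments, count distinct by scanning
--     # adjacent entries; total = one second per move + four per new segment.
--     deltas = {'N': (0, 1), 'S': (0, -1), 'E': (1, 0), 'W': (-1, 0)}
--     positions = [(0, 0)]
--     x, y = 0, 0
--     for c in movements:
--         dx, dy = deltas.get(c, (0, 0))
--         x, y = x + dx, y + dy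
--         positions.append((x, y))
--     segments = sorted((min(p, q), max(p, q)) for p, q in zip(positions, positions[1:]))
--     distinct = 0
--     prev = None
--     for s in segments:
--         if s != prev:
--             distinct += 1
--         prev = s
--     return len(movements) + 4 * distinct
-- ===== Notes on version B (the rewrite author's own statement) =====
-- stated objective: alternative
-- what changed: B replaces A's single pass with a hash set and per-move 5/1 time accumulation by staged passes: build the position trail, canonicalize every step's undirected segment, sort the segment list, count distinct segments by scanning adjacent sorted entries, and return len(movements) + 4*distinct.
import Mathlib
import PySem

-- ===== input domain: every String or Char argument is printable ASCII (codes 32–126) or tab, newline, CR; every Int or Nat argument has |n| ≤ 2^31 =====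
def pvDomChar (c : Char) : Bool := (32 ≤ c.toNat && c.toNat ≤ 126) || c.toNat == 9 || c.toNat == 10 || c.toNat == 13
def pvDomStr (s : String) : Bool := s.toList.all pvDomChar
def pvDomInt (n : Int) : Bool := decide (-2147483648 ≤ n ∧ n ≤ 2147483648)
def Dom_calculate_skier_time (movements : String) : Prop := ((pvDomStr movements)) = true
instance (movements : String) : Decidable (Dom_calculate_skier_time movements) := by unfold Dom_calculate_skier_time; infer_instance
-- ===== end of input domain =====

-- B is an alternative algorithm: staged passes (position trail → canonical segments →
-- sort → adjacent-scan distinct count → closed form) instead of A's single pass with a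
-- visited-set and per-move 5/1 accumulation. Similar cost; no speed claim.

-- ===== PORT A =====
-- state: (visited_segments, time_taken, x, y)
def pvStepA (st : PySem.Set ((Int × Int) × (Int × Int)) × Int × Int × Int) (move : Char) :
    PySem.Set ((Int × Int) × (Int × Int)) × Int × Int × Int :=
  let (visited, time, x, y) := st
  let start := (x, y)
  let (x, y) :=
    if move = 'N' then (x, y + 1)
    else if move = 'S' then (x, y - 1)
    else if move = 'E' then (x + 1, y)
    else if move = 'W' then (x - 1, y)
    else (x, y)
  let endp := (x, y)
  let seg := (start, endp)
  let rseg := (endp, start)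
  if PySem.Set.contains visited seg || PySem.Set.contains visited rseg then
    (visited, time + 1, x, y)
  else
    (PySem.Set.add (PySem.Set.add visited seg) rseg, time + 5, x, y)

def calculate_skier_time (movements : String) : Int :=
  (movements.toList.foldl pvStepA (PySem.Set.empty, 0, 0, 0)).2.1

-- ===== PORT B =====
-- Python '<' on int pairs (lexicographic)
def pvLt (a b : Int × Int) : Bool := a.1 < b.1 || (a.1 == b.1 && a.2 < b.2)

-- min(p, q) / max(p, q) on pairs, Python's first-on-tie rule
def pvMinP (a b : Int × Int) : Int × Int := if pvLt b a then b else a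
def pvMaxP (a b : Int × Int) : Int × Int := if pvLt a b then b else a

-- the deltas dict in Source B
def pvDeltas : PySem.Dict Char (Int × Int) :=
  PySem.Dict.ofList [('N', (0, 1)), ('S', (0, -1)), ('E', (1, 0)), ('W', (-1, 0))]

-- sort key: Python compares ((a,b),(c,d)) tuples lexicographically = lex on (a,b,c,d)
def pvKey (s : (Int × Int) × (Int × Int)) : Lex (Int × Lex (Int × Lex (Int × Int))) :=
  toLex (s.1.1, toLex (s.1.2, toLex (s.2.1, s.2.2)))

def calculate_skier_time_alt (movements : String) : Int :=
  let st := movements.toList.foldl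
    (fun st c =>
      let (pos, x, y) := st
      let (dx, dy) := PySem.Dict.getD pvDeltas c (0, 0)
      let x := x + dx
      let y := y + dy
      (pos ++ [(x, y)], x, y))
    ([((0 : Int), (0 : Int))], (0 : Int), (0 : Int))
  let positions := st.1
  let segments := PySem.List.sorted
    ((positions.zip (PySem.List.slice positions (some 1) none)).map
      (fun pq => (pvMinP pq.1 pq.2, pvMaxP pq.1 pq.2)))
    pvKey false
  let sc := segments.foldl
    (fun st s => ((if st.2 = some s then st.1 else st.1 + 1), some s))
    ((0 : Int), (none : Option ((Int × Int) × (Int × Int))))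
  PySem.Str.len movements + 4 * sc.1

-- ===== PRECONDITION & SPEC =====
def Spec_calculate_skier_time (movements : String) (out : Int) : Prop := out = calculate_skier_time_alt movements
instance (movements : String) (out : Int) : Decidable (Spec_calculate_skier_time movements out) := by unfold Spec_calculate_skier_time; infer_instance

-- ===== CLAIM (what is proved, stated in full; the proofs are below) =====
def Claim_equal_calculate_skier_time : Prop := ∀ (movements : String), Dom_calculate_skier_time movements → Spec_calculate_skier_time movements (calculate_skier_time movements)

-- ===== LEMMAS AND PROOFS =====

-- canonical segment of one step
def pvCanon (p q : Int × Int) : (Int × Int) × (Int × Int) := (pvMinP p q, pvMaxP p q)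

-- the position trail after (x, y) while consuming l
def pvTrail : Int → Int → List Char → List (Int × Int)
  | _, _, [] => []
  | x, y, c :: cs =>
    let d := PySem.Dict.getD pvDeltas c (0, 0)
    (x + d.1, y + d.2) :: pvTrail (x + d.1) (y + d.2) cs

-- the canonical segments of the walk from (x, y) along l
def pvSegs : Int → Int → List Char → List ((Int × Int) × (Int × Int))
  | _, _, [] => []
  | x, y, c :: cs =>
    let d := PySem.Dict.getD pvDeltas c (0, 0)
    pvCanon (x, y) (x + d.1, y + d.2) :: pvSegs (x + d.1) (y + d.2) cs

lemma pvCanon_choice (p q : Int × Int) : pvCanon p q = (p, q) ∨ pvCanon p q = (q, p) := by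
  obtain ⟨p1, p2⟩ := p; obtain ⟨q1, q2⟩ := q
  unfold pvCanon pvMinP pvMaxP pvLt
  split_ifs <;> simp_all <;> omega

lemma pvCanon_comm (p q : Int × Int) : pvCanon p q = pvCanon q p := by
  obtain ⟨p1, p2⟩ := p; obtain ⟨q1, q2⟩ := q
  unfold pvCanon pvMinP pvMaxP pvLt
  split_ifs <;> simp_all <;> omega

lemma pvCanon_eq_iff (p q a b : Int × Int) :
    pvCanon p q = pvCanon a b ↔ ((p, q) = (a, b) ∨ (p, q) = (b, a)) := by
  constructor
  · intro h
    rcases pvCanon_choice p q with hpq | hpq <;>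
      rcases pvCanon_choice a b with hab | hab <;>
      rw [hpq, hab] at h <;>
      simp only [Prod.mk.injEq] at h <;>
      simp [Prod.ext_iff, h]
  · rintro (h | h) <;> simp only [Prod.mk.injEq] at h
    · rw [h.1, h.2]
    · rw [h.1, h.2]; exact pvCanon_comm b a

-- A's if-chain position update = the dict-delta update
lemma pvMove_eq (c : Char) (x y : Int) :
    (if c = 'N' then (x, y + 1)
     else if c = 'S' then (x, y - 1)
     else if c = 'E' then (x + 1, y)
     else if c = 'W' then (x - 1, y)
     else (x, y))
      = (x + (PySem.Dict.getD pvDeltas c (0, 0)).1, y + (PySem.Dict.getD pvDeltas c (0, 0)).2) := by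
  by_cases h1 : c = 'N'
  · subst h1
    have h : PySem.Dict.getD pvDeltas 'N' (0, 0) = (0, 1) := by decide
    simp [h]
  by_cases h2 : c = 'S'
  · subst h2
    have h : PySem.Dict.getD pvDeltas 'S' (0, 0) = (0, -1) := by decide
    simp [h]; ring
  by_cases h3 : c = 'E'
  · subst h3
    have h : PySem.Dict.getD pvDeltas 'E' (0, 0) = (1, 0) := by decide
    simp [h]
  by_cases h4 : c = 'W'
  · subst h4
    have h : PySem.Dict.getD pvDeltas 'W' (0, 0) = (-1, 0) := by decide
    simp [h]; ring
  have h : PySem.Dict.getD pvDeltas c (0, 0) = (0, 0) := by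
    have hmk : pvDeltas = PySem.Dict.mk [('N', (0, 1)), ('S', (0, -1)), ('E', (1, 0)), ('W', (-1, 0))] := by decide
    rw [PySem.Dict.getD_eq_get?_getD, hmk]
    simp [h1, h2, h3, h4, Ne.symm, PySem.Dict.get?]
  simp [h1, h2, h3, h4, h]

-- A-side loop invariant: time grows by #moves + 4 * (growth of the canonical segment set)
lemma pv_loopA (l : List Char) :
    ∀ (v s : PySem.Set ((Int × Int) × (Int × Int))) (t x y : Int),
      (∀ p q : Int × Int, ((p, q) ∈ v ∨ (q, p) ∈ v) ↔ pvCanon p q ∈ s) →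
      (l.foldl pvStepA (v, t, x, y)).2.1
        = t + l.length + 4 * (((pvSegs x y l).foldl PySem.Set.add s).length - (s.length : Int)) := by
  induction l with
  | nil => intro v s t x y _; simp [pvSegs]
  | cons c cs ih =>
    intro v s t x y hmem
    simp only [List.foldl_cons]
    set xy' : Int × Int :=
      (if c = 'N' then (x, y + 1)
       else if c = 'S' then (x, y - 1)
       else if c = 'E' then (x + 1, y)
       else if c = 'W' then (x - 1, y)
       else (x, y)) with hxy'
    have hmove : xy' = (x + (PySem.Dict.getD pvDeltas c (0, 0)).1,
        y + (PySem.Dict.getD pvDeltas c (0, 0)).2) := pvMove_eq c x y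
    have hA : pvStepA (v, t, x, y) c =
        (if PySem.Set.contains v ((x, y), xy') || PySem.Set.contains v (xy', (x, y)) then
          (v, t + 1, xy'.1, xy'.2)
        else
          (PySem.Set.add (PySem.Set.add v ((x, y), xy')) (xy', (x, y)), t + 5, xy'.1, xy'.2)) := by
      simp only [pvStepA, hxy']
    have hsegs : pvSegs x y (c :: cs) = pvCanon (x, y) xy' :: pvSegs xy'.1 xy'.2 cs := by
      rw [pvSegs]; simp [hmove]
    rw [hA, hsegs]
    simp only [List.foldl_cons]
    by_cases hin : ((x, y), xy') ∈ v ∨ (xy', (x, y)) ∈ v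
    · have hcond : (PySem.Set.contains v ((x, y), xy') || PySem.Set.contains v (xy', (x, y))) = true := by
        rcases hin with h | h <;> simp [PySem.Set.contains, h]
      have hs : pvCanon (x, y) xy' ∈ s := (hmem (x, y) xy').1 hin
      have hsadd : PySem.Set.add s (pvCanon (x, y) xy') = s := by
        simp [PySem.Set.add, PySem.Set.contains, hs]
      rw [hcond, if_pos rfl, hsadd]
      rw [ih v s (t + 1) xy'.1 xy'.2 hmem]
      push_cast [List.length_cons]; ring
    · have hcond : (PySem.Set.contains v ((x, y), xy') || PySem.Set.contains v (xy', (x, y))) = false := by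
        rw [not_or] at hin
        simp [PySem.Set.contains, hin.1, hin.2]
      have hs : pvCanon (x, y) xy' ∉ s := by
        intro h
        exact hin ((hmem (x, y) xy').2 h)
      have hsadd : PySem.Set.add s (pvCanon (x, y) xy') = s ++ [pvCanon (x, y) xy'] := by
        simp [PySem.Set.add, PySem.Set.contains, hs]
      rw [hcond]
      simp only [Bool.false_eq_true, if_false]
      have hmem' : ∀ p q : Int × Int,
          ((p, q) ∈ PySem.Set.add (PySem.Set.add v ((x, y), xy')) (xy', (x, y)) ∨
           (q, p) ∈ PySem.Set.add (PySem.Set.add v ((x, y), xy')) (xy', (x, y))) ↔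
          pvCanon p q ∈ s ++ [pvCanon (x, y) xy'] := by
        intro p q
        have hkey : pvCanon p q = pvCanon (x, y) xy' ↔
            ((p, q) = ((x, y), xy') ∨ (p, q) = (xy', (x, y))) := pvCanon_eq_iff p q (x, y) xy'
        simp only [PySem.Set.mem_add, List.mem_append, List.mem_singleton, hkey]
        constructor
        · rintro ((((h | h) | h) | ((h | h) | h)))
          · exact Or.inl ((hmem p q).1 (Or.inl h))
          · exact Or.inr (Or.inl h)
          · exact Or.inr (Or.inr h)
          · exact Or.inl ((hmem p q).1 (Or.inr h))
          · refine Or.inr (Or.inr ?_)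
            simp only [Prod.mk.injEq] at h ⊢; exact ⟨h.2, h.1⟩
          · refine Or.inr (Or.inl ?_)
            simp only [Prod.mk.injEq] at h ⊢; exact ⟨h.2, h.1⟩
        · rintro (h | h | h)
          · rcases (hmem p q).2 h with h' | h'
            · exact Or.inl (Or.inl (Or.inl h'))
            · exact Or.inr (Or.inl (Or.inl h'))
          · exact Or.inl (Or.inl (Or.inr h))
          · exact Or.inl (Or.inr h)
      rw [hsadd, ih _ _ (t + 5) xy'.1 xy'.2 hmem']
      push_cast [List.length_cons, List.length_append, List.length_nil]; ring

-- B's position fold builds [(0,0)] ++ trail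
lemma pv_posFold (l : List Char) :
    ∀ (pos : List (Int × Int)) (x y : Int),
      (l.foldl
        (fun st c =>
          let (pos, x, y) := st
          let (dx, dy) := PySem.Dict.getD pvDeltas c (0, 0)
          let x := x + dx
          let y := y + dy
          (pos ++ [(x, y)], x, y))
        (pos, x, y)).1 = pos ++ pvTrail x y l := by
  induction l with
  | nil => intro pos x y; simp [pvTrail]
  | cons c cs ih =>
    intro pos x y
    simp only [List.foldl_cons]
    rw [ih]
    simp [pvTrail]

-- zip of consecutive positions, canonicalized, is pvSegs
lemma pv_zipSegs (l : List Char) :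
    ∀ (x y : Int),
      ((((x, y) :: pvTrail x y l).zip (pvTrail x y l)).map
        (fun pq => (pvMinP pq.1 pq.2, pvMaxP pq.1 pq.2))) = pvSegs x y l := by
  induction l with
  | nil => intro x y; simp [pvTrail, pvSegs]
  | cons c cs ih =>
    intro x y
    simp only [pvTrail, pvSegs]
    rw [List.zip_cons_cons, List.map_cons]
    exact congrArg _ (ih _ _)

lemma pvKey_inj (a b : (Int × Int) × (Int × Int)) : pvKey a = pvKey b → a = b := by
  obtain ⟨⟨a1, a2⟩, a3, a4⟩ := a; obtain ⟨⟨b1, b2⟩, b3, b4⟩ := b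
  simp [pvKey]
  omega

-- scan of a key-sorted list counts the distinct elements (prev already minimal)
lemma pv_scan_some (M : List ((Int × Int) × (Int × Int))) :
    ∀ (c : Int) (p : (Int × Int) × (Int × Int)),
      M.Pairwise (fun a b => pvKey a ≤ pvKey b) →
      (∀ q ∈ M, pvKey p ≤ pvKey q) →
      (M.foldl (fun st s => ((if st.2 = some s then st.1 else st.1 + 1), some s)) (c, some p)).1
        = c + ((M.toFinset.erase p).card : Int) := by
  induction M with
  | nil => intro c p _ _; simp
  | cons a rest ih =>
    intro c p hpw hmin
    have hale : ∀ q ∈ rest, pvKey a ≤ pvKey q := (List.pairwise_cons.mp hpw).1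
    have hpwrest := (List.pairwise_cons.mp hpw).2
    simp only [List.foldl_cons]
    by_cases hap : p = a
    · subst hap
      rw [if_pos rfl]
      rw [ih c p hpwrest hale, List.toFinset_cons, Finset.erase_insert_eq_erase]
    · rw [if_neg (by simp [hap])]
      rw [ih (c + 1) a hpwrest hale]
      have hpnot : p ∉ rest := by
        intro hmemr
        have h1 := hale p hmemr
        have h2 := hmin a (List.mem_cons_self)
        exact hap ((pvKey_inj p a (le_antisymm h2 h1)))
      have herase : ((a :: rest).toFinset).erase p = (a :: rest).toFinset := by
        apply Finset.erase_eq_of_notMem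
        simp [hap, hpnot]
      have hcard : ((a :: rest).toFinset).card = (rest.toFinset.erase a).card + 1 := by
        by_cases ha : a ∈ rest.toFinset
        · rw [List.toFinset_cons, Finset.insert_eq_self.mpr ha, ← Finset.card_erase_add_one ha]
        · rw [List.toFinset_cons, Finset.card_insert_of_notMem ha, Finset.erase_eq_of_notMem ha]
      rw [herase, hcard]
      push_cast; ring

lemma pv_scan_none (M : List ((Int × Int) × (Int × Int))) :
    M.Pairwise (fun a b => pvKey a ≤ pvKey b) →
    (M.foldl (fun st s => ((if st.2 = some s then st.1 else st.1 + 1), some s))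
        ((0 : Int), (none : Option ((Int × Int) × (Int × Int))))).1
      = (M.toFinset.card : Int) := by
  intro hpw
  cases M with
  | nil => simp
  | cons a rest =>
    have hale : ∀ q ∈ rest, pvKey a ≤ pvKey q := (List.pairwise_cons.mp hpw).1
    have hpwrest := (List.pairwise_cons.mp hpw).2
    simp only [List.foldl_cons]
    rw [if_neg (by simp)]
    rw [pv_scan_some rest (0 + 1) a hpwrest hale]
    have hcard : ((a :: rest).toFinset).card = (rest.toFinset.erase a).card + 1 := by
      by_cases ha : a ∈ rest.toFinset
      · rw [List.toFinset_cons, Finset.insert_eq_self.mpr ha, ← Finset.card_erase_add_one ha]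
      · rw [List.toFinset_cons, Finset.card_insert_of_notMem ha, Finset.erase_eq_of_notMem ha]
    rw [hcard]
    push_cast; ring

-- length of the set built by a fold of adds from empty = number of distinct elements
lemma pv_setLen (L : List ((Int × Int) × (Int × Int))) :
    ((L.foldl PySem.Set.add PySem.Set.empty).length : Int) = (L.toFinset.card : Int) := by
  have h1 : L.foldl PySem.Set.add PySem.Set.empty = PySem.Set.ofList L := by
    rw [PySem.Set.ofList_eq_foldl]; rfl
  have h2 : (PySem.Set.ofList L).toFinset = L.toFinset := by
    ext x; simp [PySem.Set.mem_ofList]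
  have h3 : (PySem.Set.ofList L).toFinset.card = (PySem.Set.ofList L).length :=
    List.toFinset_card_of_nodup (PySem.Set.nodup_ofList L)
  rw [h1]
  rw [← h2, h3]

-- ===== VERDICT (by name: the statement is the Claim_ definition above) =====
theorem calculate_skier_time_spec : Claim_equal_calculate_skier_time := by
  intro movements _
  unfold Spec_calculate_skier_time calculate_skier_time calculate_skier_time_alt
  have hA := pv_loopA movements.toList PySem.Set.empty PySem.Set.empty 0 0 0
    (by intro p q; simp [PySem.Set.empty])
  rw [hA]
  have hpos := pv_posFold movements.toList [((0 : Int), (0 : Int))] 0 0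
  simp only [hpos]
  rw [PySem.List.slice_from_one]
  simp only [List.cons_append, List.nil_append, List.tail_cons]
  rw [pv_zipSegs]
  set L := pvSegs 0 0 movements.toList with hL
  set M := PySem.List.sorted L pvKey false with hM
  have hscan := pv_scan_none M (PySem.List.sorted_pairwise L pvKey)
  simp only [hscan]
  have hperm : M.Perm L := PySem.List.sorted_perm L pvKey false
  rw [List.toFinset_eq_of_perm M L hperm]
  rw [pv_setLen L]
  rw [PySem.Str.len_eq]
  push_cast [PySem.Set.empty]
  simp
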